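-- pv_equiv track=rewrite | github.com/oleglk/Interview | CODE/OLD/SET02/topological_sort.py | _calc_indegrees
-- ===== SOURCE A (Python) =====
-- def _calc_indegrees(adjLists: dict) -> dict:
--     vertexToInDegree = {}
--     for vertex in adjLists.keys():
--         vertexToInDegree[vertex] = 0  # init all in-degrees to 0
--     for targets in adjLists.values():
--         # 'targets' is list of edge-target vertices
--         # count how many times a vertex appears as edge-target
--         for edgeTarget in targets:
--             if ( edgeTarget not in vertexToInDegree ):
--                 # in case 'edgeTarget' doesn't appear as source/key, init it now
--                 vertexToInDegree[edgeTarget] = 1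
--             else:
--                 vertexToInDegree[edgeTarget] += 1
--     return(vertexToInDegree)
-- ===== SOURCE B (Python) =====
-- def _calc_indegrees(adjLists: dict) -> dict:
--     # Flatten every adjacency list into one list of edge targets.
--     flat = [t for targets in adjLists.values() for t in targets]
--     # Final key order: source vertices first, then non-source targets
--     # in order of first appearance as an edge target.
--     keys = list(adjLists)
--     for t in flat:
--         if t not in keys:
--             keys.append(t)
--     # In-degree of a vertex = how often it occurs as an edge target.
--     return {k: flat.count(k) for k in keys}
-- ===== Notes on version B (the rewrite author's own statement) =====
-- stated objective: alternative
-- what changed: A builds the result dict incrementally, branching per edge between inserting 1 and incrementing; B never increments: it flattens all edge targets once, computes the final key order first (sources, then unseen targets by first appearance), and then derives each key's in-degree directly as flat.count(k).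
import Mathlib
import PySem

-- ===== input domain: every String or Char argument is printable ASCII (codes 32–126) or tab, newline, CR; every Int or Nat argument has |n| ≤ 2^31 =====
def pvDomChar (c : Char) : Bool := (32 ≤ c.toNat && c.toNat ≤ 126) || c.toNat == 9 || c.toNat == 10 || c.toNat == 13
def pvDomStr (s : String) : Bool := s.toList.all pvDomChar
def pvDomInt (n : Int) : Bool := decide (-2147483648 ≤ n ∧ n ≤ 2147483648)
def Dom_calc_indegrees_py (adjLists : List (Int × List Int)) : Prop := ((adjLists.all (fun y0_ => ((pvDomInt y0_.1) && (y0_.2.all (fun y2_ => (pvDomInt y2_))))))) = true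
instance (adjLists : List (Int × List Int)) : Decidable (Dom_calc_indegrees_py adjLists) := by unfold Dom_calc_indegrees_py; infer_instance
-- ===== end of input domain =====

-- B computes the key order first and then derives each in-degree by counting the key's
-- occurrences in the flattened target list — no incremental updates (objective: alternative).

-- ===== PORT A =====
-- A: init every source key to 0, then per edge either insert 1 (new target) or += 1.
def calc_indegrees_py (adjLists : List (Int × List Int)) : List (Int × Int) :=
  let init : PySem.Dict Int Int :=
    adjLists.foldl (fun d kv => d.insert kv.1 0) PySem.Dict.empty
  let final : PySem.Dict Int Int :=
    adjLists.foldl (fun d kv =>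
      kv.2.foldl (fun d t =>
        if d.contains t = false then d.insert t 1 else d.modify t 0 (· + 1)) d) init
  final.items

-- ===== PORT B =====
-- B: flat = all edge targets; keys = sources then unseen targets by first appearance;
-- result = {k: flat.count(k) for k in keys}.
def calc_indegrees_py_alt (adjLists : List (Int × List Int)) : List (Int × Int) :=
  let flat : List Int := adjLists.flatMap (·.2)
  let keys : List Int :=
    flat.foldl (fun ks t => if t ∈ ks then ks else ks ++ [t])
      (PySem.Set.ofList (adjLists.map (·.1)))       -- list(adjLists): the dict's (unique) keys
  keys.map (fun k => (k, (flat.count k : Int)))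

-- ===== PRECONDITION & SPEC =====
def Spec_calc_indegrees_py (adjLists : List (Int × List Int)) (out : List (Int × Int)) : Prop := out = calc_indegrees_py_alt adjLists
instance (adjLists : List (Int × List Int)) (out : List (Int × Int)) : Decidable (Spec_calc_indegrees_py adjLists out) := by unfold Spec_calc_indegrees_py; infer_instance

-- ===== CLAIM (what is proved, stated in full; the proofs are below) =====
def Claim_equal_calc_indegrees_py : Prop := ∀ (adjLists : List (Int × List Int)), Dom_calc_indegrees_py adjLists → Spec_calc_indegrees_py adjLists (calc_indegrees_py adjLists)

-- ===== LEMMAS AND PROOFS =====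

-- A's per-edge branch is one overwrite-insert with the bumped tally.
lemma stepA_eq_insert (d : PySem.Dict Int Int) (t : Int) :
    (if d.contains t = false then d.insert t 1 else d.modify t 0 (· + 1))
      = d.insert t (d.getD t 0 + 1) := by
  by_cases h : d.contains t = false
  · rw [if_pos h, PySem.Dict.getD_of_not_contains _ _ h]; norm_num
  · rw [if_neg h]; exact PySem.Dict.ext_iff.mpr rfl

-- B's membership loop is PySem.Set.update.
lemma keys_fold_eq_update (flat : List Int) (s : PySem.Set Int) :
    flat.foldl (fun ks t => if t ∈ ks then ks else ks ++ [t]) s = PySem.Set.update s flat := by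
  induction flat generalizing s with
  | nil => rfl
  | cons t ts ih =>
    rw [PySem.Set.update_cons, List.foldl_cons, ← ih]
    congr 1
    by_cases h : t ∈ s <;> simp [PySem.Set.add, PySem.Set.contains, h]

-- A's zero-initialisation pass leaves every lookup (key or not) at 0.
lemma getD_init_zero (adjLists : List (Int × List Int)) (k : Int) :
    (adjLists.foldl (fun d kv => d.insert kv.1 0) (PySem.Dict.empty : PySem.Dict Int Int)).getD k 0 = 0 := by
  induction adjLists using List.reverseRecOn with
  | nil => simp
  | append_singleton xs x ih =>
    rw [List.foldl_append, List.foldl_cons, List.foldl_nil, PySem.Dict.getD_insert]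
    split <;> [rfl; exact ih]

-- ===== VERDICT (by name: the statement is the Claim_ definition above) =====
theorem calc_indegrees_py_spec : Claim_equal_calc_indegrees_py := by
  intro adjLists _
  unfold Spec_calc_indegrees_py calc_indegrees_py calc_indegrees_py_alt
  have hstep : (fun (d : PySem.Dict Int Int) (t : Int) =>
      if d.contains t = false then d.insert t 1 else d.modify t 0 (· + 1))
        = fun d t => d.insert t (d.getD t 0 + 1) :=
    funext fun d => funext fun t => stepA_eq_insert d t
  simp only [hstep, ← List.foldl_flatMap, keys_fold_eq_update]
  have hnd0 : (adjLists.foldl (fun d kv => d.insert kv.1 0)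
      (PySem.Dict.empty : PySem.Dict Int Int)).keys.Nodup := by
    apply PySem.Dict.nodup_keys_foldl_insert_key
    simp [PySem.Dict.keys_empty]
  have hnd := PySem.Dict.nodup_keys_foldl_insert (adjLists.flatMap (·.2))
      (fun d t => d.getD t 0 + 1) _ hnd0
  rw [PySem.Dict.items_eq_map_keys _ hnd 0, PySem.Dict.keys_foldl_insert]
  have hkeys : (adjLists.foldl (fun d kv => d.insert kv.1 0)
      (PySem.Dict.empty : PySem.Dict Int Int)).keys
      = PySem.Set.ofList (adjLists.map (·.1)) := by
    rw [PySem.Dict.keys_foldl_insert_key, PySem.Dict.keys_empty, PySem.Set.update_nil_left]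
  rw [hkeys]
  apply List.map_congr_left
  intro k _
  rw [PySem.Dict.getD_foldl_insert_add_one, getD_init_zero adjLists k]
  simp
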